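-- pv_equiv track=rewrite | github.com/HuyNguyenDinh/cardinal-numeral-vietnamese | cardinal_numeral_vietnam.py | tach
-- ===== SOURCE A (Python) =====
-- def tach(n):
--     a = []
--     while(n > 0):
--         d = n % 1000
--         a.append(d)
--         n //= 1000
--     a.reverse()     #Xếp theo chiều từ trái sang phải giống như số tự nhiên chỉ tách theo nhóm 3 số
--     return a
-- ===== SOURCE B (Python) =====
-- def tach(n):
--     if n <= 0:
--         return []
--     return tach(n // 1000) + [n % 1000]
-- ===== Notes on version B (the rewrite author's own statement) =====
-- stated objective: simpler
-- what changed: Replaced the while-loop that appends base-thousand remainders into a list and then reverses it in place by a direct recursion on the quotient that builds the groups left-to-right, with no accumulator list and no reverse.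
import Mathlib
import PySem

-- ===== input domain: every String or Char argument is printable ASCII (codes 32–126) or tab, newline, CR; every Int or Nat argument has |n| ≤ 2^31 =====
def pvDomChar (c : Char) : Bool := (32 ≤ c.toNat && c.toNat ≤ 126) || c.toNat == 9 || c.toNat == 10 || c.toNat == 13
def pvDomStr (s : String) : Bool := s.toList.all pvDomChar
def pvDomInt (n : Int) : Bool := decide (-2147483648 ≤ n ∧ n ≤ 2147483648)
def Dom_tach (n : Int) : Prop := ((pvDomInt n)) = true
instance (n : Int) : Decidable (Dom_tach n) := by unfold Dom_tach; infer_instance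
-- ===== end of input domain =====

-- B replaces A's while-loop (append remainders, then reverse in place) by a direct
-- recursion on n // 1000 that emits the groups left-to-right; simpler, same cost.

-- termination helper, cited by the ports' decreasing_by
theorem pvFloordiv1000_toNat_lt (n : Int) (h : 0 < n) :
    (PySem.Int.floordiv n 1000).toNat < n.toNat := by
  rw [PySem.Int.floordiv_eq_ediv_of_pos (by omega)]
  omega

-- ===== PORT A =====
-- the while-loop of A: state is (n, a); a.append(d) is a ++ [d]
def tachLoop (n : Int) (a : List Int) : List Int :=
  if _h : n > 0 then
    tachLoop (PySem.Int.floordiv n 1000) (a ++ [PySem.Int.mod n 1000])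
  else a
termination_by n.toNat
decreasing_by exact pvFloordiv1000_toNat_lt n _h

def tach (n : Int) : List Int := (tachLoop n []).reverse

-- ===== PORT B =====
def tach_alt (n : Int) : List Int :=
  if _h : n ≤ 0 then []
  else tach_alt (PySem.Int.floordiv n 1000) ++ [PySem.Int.mod n 1000]
termination_by n.toNat
decreasing_by exact pvFloordiv1000_toNat_lt n (by omega)

-- ===== PRECONDITION & SPEC =====
def Spec_tach (n : Int) (out : List Int) : Prop := out = tach_alt n
instance (n : Int) (out : List Int) : Decidable (Spec_tach n out) := by unfold Spec_tach; infer_instance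

-- ===== CLAIM (what is proved, stated in full; the proofs are below) =====
def Claim_equal_tach : Prop := ∀ (n : Int), Dom_tach n → Spec_tach n (tach n)

-- ===== LEMMAS AND PROOFS =====

theorem tach_alt_pos (n : Int) (h : 0 < n) :
    tach_alt n = tach_alt (PySem.Int.floordiv n 1000) ++ [PySem.Int.mod n 1000] := by
  conv_lhs => rw [tach_alt]
  rw [dif_neg (by omega)]

theorem tachLoop_eq (n : Int) (a : List Int) :
    tachLoop n a = a ++ (tach_alt n).reverse := by
  induction n, a using tachLoop.induct with
  | case1 n a h ih =>
    rw [tachLoop, dif_pos h, ih, tach_alt_pos n h]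
    simp
  | case2 n a h =>
    rw [tachLoop, dif_neg h, tach_alt, dif_pos (by omega)]
    simp

-- ===== VERDICT (by name: the statement is the Claim_ definition above) =====
theorem tach_spec : Claim_equal_tach := by
  intro n _
  unfold Spec_tach tach
  rw [tachLoop_eq]
  simp
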